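-- pv_equiv track=rewrite | github.com/TopherNie/toy-project | python/find_largest/hand_highlight.py | get_card_index
-- ===== SOURCE A (Python) =====
-- def get_card_index(card_arr, find_card, i):
--     count = 0
--     for j, card in enumerate(card_arr):
--         # String contains
--         if find_card in card:
--             if count == i:
--                 return j
--             count += 1
--     return -1
-- ===== SOURCE B (Python) =====
-- def get_card_index(card_arr, find_card, i):
--     # Stage 1: cumulative count of matching cards over each prefix.
--     cum = []
--     c = 0
--     for card in card_arr:
--         c += find_card in card
--         cum.append(c)
--     # Stage 2: the (i+1)-th match is at the first position where the count reaches i+1.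
--     return cum.index(i + 1) if 0 <= i < c else -1
-- ===== Notes on version B (the rewrite author's own statement) =====
-- stated objective: alternative
-- what changed: Replaces the early-return running-counter scan by a two-stage prefix-sum method: build the cumulative match-count table, then locate the answer as the first position where the count reaches i+1 via list.index.
import Mathlib
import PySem

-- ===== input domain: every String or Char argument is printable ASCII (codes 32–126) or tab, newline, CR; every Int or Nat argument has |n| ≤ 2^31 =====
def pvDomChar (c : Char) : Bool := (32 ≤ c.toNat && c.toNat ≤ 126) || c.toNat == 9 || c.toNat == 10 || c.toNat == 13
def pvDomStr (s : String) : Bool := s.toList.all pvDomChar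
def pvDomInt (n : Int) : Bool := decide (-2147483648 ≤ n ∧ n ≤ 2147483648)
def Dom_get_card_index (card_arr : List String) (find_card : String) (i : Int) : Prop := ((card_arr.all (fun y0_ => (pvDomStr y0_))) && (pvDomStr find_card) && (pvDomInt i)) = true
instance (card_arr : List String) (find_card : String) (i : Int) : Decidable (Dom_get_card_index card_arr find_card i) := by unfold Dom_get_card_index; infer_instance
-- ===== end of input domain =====

-- ===== PORT A =====
-- B replaces A's early-return counter scan by a prefix-sum table plus a value search; objective: alternative decomposition.
-- helper: A's loop — j the enumerate index, count the running match counter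
def getCardIndexLoop (find_card : String) (i : Int) : List String → Int → Int → Int
  | [], _, _ => -1
  | card :: rest, j, count =>
    if PySem.Str.isIn find_card card then
      (if count = i then j else getCardIndexLoop find_card i rest (j + 1) (count + 1))
    else getCardIndexLoop find_card i rest (j + 1) count

def get_card_index (card_arr : List String) (find_card : String) (i : Int) : Int :=
  getCardIndexLoop find_card i card_arr 0 0

-- ===== PORT B =====
-- stage 1 of Source B: the loop building c (total so far) and cum (the appended prefix-count table)
def cumLoop (find_card : String) : List String → Int → List Int → Int × List Int
  | [], c, cum => (c, cum)
  | card :: rest, c, cum =>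
    let c' := c + (if PySem.Str.isIn find_card card then 1 else 0)
    cumLoop find_card rest c' (cum ++ [c'])

-- stage 2: cum.index(i + 1) under the guard 0 <= i < c (the guard makes the index call total,
-- so the `none` default of index? is never reached)
def get_card_index_alt (card_arr : List String) (find_card : String) (i : Int) : Int :=
  let p := cumLoop find_card card_arr 0 []
  if 0 ≤ i ∧ i < p.1 then
    match PySem.List.index? p.2 (i + 1) with
    | some k => (k : Int)
    | none => -1
  else -1

-- ===== PRECONDITION & SPEC =====
def Spec_get_card_index (card_arr : List String) (find_card : String) (i : Int) (out : Int) : Prop := out = get_card_index_alt card_arr find_card i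
instance (card_arr : List String) (find_card : String) (i : Int) (out : Int) : Decidable (Spec_get_card_index card_arr find_card i out) := by unfold Spec_get_card_index; infer_instance

-- ===== CLAIM (what is proved, stated in full; the proofs are below) =====
def Claim_equal_get_card_index : Prop := ∀ (card_arr : List String) (find_card : String) (i : Int), Dom_get_card_index card_arr find_card i → Spec_get_card_index card_arr find_card i (get_card_index card_arr find_card i)

-- ===== LEMMAS AND PROOFS =====
-- pure form of the prefix-count table, starting from accumulator c
def cumCounts (f : String) : List String → Int → List Int
  | [], _ => []
  | card :: rest, c =>
    let c' := c + (if PySem.Str.isIn f card then 1 else 0)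
    c' :: cumCounts f rest c'

-- number of matches in a list
def cnt (f : String) : List String → Int
  | [] => 0
  | card :: rest => (if PySem.Str.isIn f card then 1 else 0) + cnt f rest

theorem cnt_nonneg (f : String) (cs : List String) : 0 ≤ cnt f cs := by
  induction cs with
  | nil => simp [cnt]
  | cons c rest ih => simp only [cnt]; split <;> omega

theorem cumLoop_eq (f : String) (cs : List String) :
    ∀ (c : Int) (acc : List Int),
      cumLoop f cs c acc = (c + cnt f cs, acc ++ cumCounts f cs c) := by
  induction cs with
  | nil => intro c acc; simp [cumLoop, cnt, cumCounts]
  | cons card rest ih =>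
    intro c acc
    simp only [cumLoop, cnt, cumCounts, ih, Prod.mk.injEq]
    refine ⟨by ring, by simp⟩

-- membership of i+1 in the table ↔ the total reaches i+1 (for c ≤ i)
theorem mem_cumCounts (f : String) (i : Int) (cs : List String) :
    ∀ (c : Int), c ≤ i → ((i + 1) ∈ cumCounts f cs c ↔ i + 1 ≤ c + cnt f cs) := by
  induction cs with
  | nil => intro c hc; simp [cumCounts, cnt]; omega
  | cons card rest ih =>
    intro c hc
    simp only [cumCounts, cnt, List.mem_cons]
    by_cases hm : PySem.Str.isIn f card
    · simp only [hm, if_true]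
      by_cases he : i = c
      · subst he
        have := cnt_nonneg f rest
        constructor
        · intro _; omega
        · intro _; left; ring
      · have hc' : c + 1 ≤ i := by omega
        rw [ih (c + 1) hc']
        constructor
        · rintro (h | h) <;> omega
        · intro h; right; omega
    · simp only [hm, Bool.false_eq_true, if_false, add_zero]
      have hne : i + 1 ≠ c := by omega
      rw [ih c hc]
      constructor
      · rintro (h | h); · omega
        · omega
      · intro h; right; omega

-- A's loop is a guarded value search for i+1 in the prefix-count table
theorem getCardIndexLoop_eq (f : String) (i : Int) (cs : List String) :
    ∀ (j c : Int),
      getCardIndexLoop f i cs j c =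
        (if c ≤ i then
          (match PySem.List.index? (cumCounts f cs c) (i + 1) with
           | some k => j + k
           | none => -1)
         else -1) := by
  induction cs with
  | nil =>
    intro j c
    simp [getCardIndexLoop, cumCounts, PySem.List.index?]
  | cons card rest ih =>
    intro j c
    by_cases hm : PySem.Str.isIn f card
    · simp only [getCardIndexLoop, hm, if_true, cumCounts]
      by_cases he : c = i
      · subst he
        rw [if_pos (le_refl c), PySem.List.index?_cons_self, if_pos rfl]
        simp
      · rw [if_neg he, ih (j + 1) (c + 1)]
        by_cases hc : c ≤ i
        · rw [if_pos (show c + 1 ≤ i by omega), if_pos hc,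
              PySem.List.index?_cons_of_ne _ (show c + 1 ≠ i + 1 by omega)]
          cases PySem.List.index? (cumCounts f rest (c + 1)) (i + 1) with
          | none => simp
          | some k => simp; ring
        · rw [if_neg (show ¬(c + 1 ≤ i) by omega), if_neg hc]
    · simp only [getCardIndexLoop, hm, Bool.false_eq_true, if_false, cumCounts, add_zero]
      rw [ih (j + 1) c]
      by_cases hc : c ≤ i
      · rw [if_pos hc, if_pos hc,
            PySem.List.index?_cons_of_ne _ (show c ≠ i + 1 by omega)]
        cases PySem.List.index? (cumCounts f rest c) (i + 1) with
        | none => simp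
        | some k => simp; ring
      · rw [if_neg hc, if_neg hc]

-- ===== VERDICT (by name: the statement is the Claim_ definition above) =====
theorem get_card_index_spec : Claim_equal_get_card_index := by
  intro card_arr find_card i _
  unfold Spec_get_card_index get_card_index get_card_index_alt
  rw [getCardIndexLoop_eq, cumLoop_eq]
  simp only [List.nil_append]
  by_cases h0 : 0 ≤ i
  · rw [if_pos h0]
    by_cases hlt : i < 0 + cnt find_card card_arr
    · rw [if_pos ⟨h0, hlt⟩]
      cases hidx : PySem.List.index? (cumCounts find_card card_arr 0) (i + 1) with
      | none =>
        exfalso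
        have hmem : (i + 1) ∈ cumCounts find_card card_arr 0 :=
          (mem_cumCounts find_card i card_arr 0 h0).mpr (by omega)
        rw [PySem.List.index?_eq_none_iff] at hidx
        exact hidx hmem
      | some k => simp
    · rw [if_neg (by intro h; exact hlt h.2)]
      have hnm : (i + 1) ∉ cumCounts find_card card_arr 0 := by
        intro hmem
        exact hlt (by have := (mem_cumCounts find_card i card_arr 0 h0).mp hmem; omega)
      have hnone : PySem.List.index? (cumCounts find_card card_arr 0) (i + 1) = none := by
        rw [PySem.List.index?_eq_none_iff]; exact hnm
      rw [hnone]
  · rw [if_neg h0, if_neg (by intro h; exact h0 h.1)]
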